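-- pv_equiv track=rewrite | github.com/askwlc/test_task | task_2.py | remove_zeros
-- ===== SOURCE A (Python) =====
-- def remove_zeros(array):
--     write_index = 0
--     for read_index in range(len(array)):
--         if array[read_index] != 0:
--             array[write_index] = array[read_index]
--             write_index += 1
--     del array[write_index:]
--     return array
-- ===== SOURCE B (Python) =====
-- def remove_zeros(array):
--     # Count the zeros once, then delete them one by one with list.remove,
--     # which shifts the tail left each time; no write pointer, no filtering pass.
--     for _ in range(array.count(0)):
--         array.remove(0)
--     return array
-- ===== Notes on version B (the rewrite author's own statement) =====
-- stated objective: alternative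
-- what changed: Replaces the single-pass two-pointer compaction (read/write indices, tail truncation) by counting the zeros once and then deleting them one at a time with list.remove, i.e. repeated first-occurrence erasure instead of a filtering scan.
import Mathlib
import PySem

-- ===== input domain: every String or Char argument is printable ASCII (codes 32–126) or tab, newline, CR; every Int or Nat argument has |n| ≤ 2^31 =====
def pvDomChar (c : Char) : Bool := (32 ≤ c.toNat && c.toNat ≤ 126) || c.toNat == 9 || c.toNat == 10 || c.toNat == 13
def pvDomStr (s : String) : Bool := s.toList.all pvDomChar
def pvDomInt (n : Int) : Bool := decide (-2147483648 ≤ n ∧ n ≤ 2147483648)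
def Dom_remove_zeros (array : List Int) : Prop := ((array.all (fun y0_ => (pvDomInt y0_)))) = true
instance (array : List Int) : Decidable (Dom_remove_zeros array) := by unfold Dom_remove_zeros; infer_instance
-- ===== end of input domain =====

-- B counts the zeros once and then deletes them one at a time with list.remove
-- (repeated first-occurrence erasure) instead of A's two-pointer compaction; both
-- Pythons mutate `array` in place to the same final contents and return it; the
-- equivalence proved here is about the returned value.

-- ===== PORT A =====
-- loop body: if array[read_index] != 0: array[write_index] = array[read_index]; write_index += 1
-- (both indices are always in range: the 0-default of pyGetD and List.set's out-of-range
-- no-op are never reached)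
def removeZerosStep (st : List Int × Nat) (i : Int) : List Int × Nat :=
  if PySem.List.pyGetD st.1 i 0 ≠ 0 then
    (st.1.set st.2 (PySem.List.pyGetD st.1 i 0), st.2 + 1)
  else st

def remove_zeros (array : List Int) : List Int :=
  let st := (PySem.List.pyRange 0 (array.length : Int) 1).foldl removeZerosStep (array, 0)
  -- del array[write_index:]
  st.1.take st.2

-- ===== PORT B =====
-- for _ in range(array.count(0)): array.remove(0)
-- (the ValueError branch of remove, the `none` case, is never reached: a zero is
-- still present at each of the counted steps)
def remove_zeros_alt (array : List Int) : List Int :=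
  (PySem.List.pyRange 0 ((PySem.List.count array 0 : Nat) : Int) 1).foldl
    (fun st _ =>
      match PySem.List.remove? st 0 with
      | some l => l
      | none => st)
    array

-- ===== PRECONDITION & SPEC =====
def Spec_remove_zeros (array : List Int) (out : List Int) : Prop := out = remove_zeros_alt array
instance (array : List Int) (out : List Int) : Decidable (Spec_remove_zeros array out) := by unfold Spec_remove_zeros; infer_instance

-- ===== CLAIM (what is proved, stated in full; the proofs are below) =====
def Claim_equal_remove_zeros : Prop := ∀ (array : List Int), Dom_remove_zeros array → Spec_remove_zeros array (remove_zeros array)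

-- ===== LEMMAS AND PROOFS =====

-- ---- A-side: the two-pointer loop computes the filter ----

-- Loop invariant: after processing indices < k, the state is
-- (F ++ arr.drop F.length, F.length) with F = (arr.take k).filter (· ≠ 0).
lemma removeZeros_loop (arr : List Int) :
    ∀ (k : Nat), k ≤ arr.length →
    (PySem.List.pyRange (k : Int) (arr.length : Int) 1).foldl removeZerosStep
        ((arr.take k).filter (fun x => x ≠ 0) ++ arr.drop ((arr.take k).filter (fun x => x ≠ 0)).length,
         ((arr.take k).filter (fun x => x ≠ 0)).length)
      = (arr.filter (fun x => x ≠ 0) ++ arr.drop (arr.filter (fun x => x ≠ 0)).length,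
         (arr.filter (fun x => x ≠ 0)).length) := by
  intro k hk
  induction h : arr.length - k generalizing k with
  | zero =>
      have hk' : k = arr.length := by omega
      subst hk'
      rw [PySem.List.pyRange_one_eq_nil (by omega)]
      simp
  | succ n ih =>
      have hklt : k < arr.length := by omega
      set F := (arr.take k).filter (fun x => x ≠ 0) with hF
      have hFlen : F.length ≤ k := by
        calc F.length ≤ (arr.take k).length := List.length_filter_le _ _
          _ ≤ k := by simp
      rw [PySem.List.pyRange_one_cons (by exact_mod_cast hklt)]
      have hlen : (F ++ arr.drop F.length).length = arr.length := by
        simp; omega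
      have hget : PySem.List.pyGetD (F ++ arr.drop F.length) (k : Int) 0 = arr[k] := by
        rw [PySem.List.pyGetD_natCast]
        rw [List.getD_eq_getElem _ _ (by omega)]
        rw [List.getElem_append_right (by omega)]
        rw [List.getElem_drop]
        congr 1
        omega
      have hstep : removeZerosStep (F ++ arr.drop F.length, F.length) (k : Int)
          = ((arr.take (k+1)).filter (fun x => x ≠ 0) ++
               arr.drop (((arr.take (k+1)).filter (fun x => x ≠ 0)).length),
             ((arr.take (k+1)).filter (fun x => x ≠ 0)).length) := by
        have htake : arr.take (k+1) = arr.take k ++ [arr[k]] := by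
          rw [List.take_add_one]
          simp [List.getElem?_eq_getElem hklt]
        have hdropF : arr.drop F.length = arr[F.length] :: arr.drop (F.length + 1) := by
          rw [List.drop_eq_getElem_cons (by omega)]
        unfold removeZerosStep
        by_cases hz : arr[k] = 0
        · simp only [hget, hz]
          simp [htake, hz, hF]
        · simp only [hget]
          rw [if_pos (by simpa using hz)]
          simp only [htake, List.filter_append, List.filter_singleton,
            show decide (arr[k] ≠ 0) = true by simp [hz], cond_true]
          simp only [← hF, List.length_append, List.length_singleton]
          refine Prod.ext ?_ rfl
          rw [List.set_append_right _ _ (by simp), hdropF]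
          simp
          rw [hdropF, List.set_cons_zero]
      rw [List.foldl_cons, hstep]
      have hpush : ((k : Int) + 1) = ((k + 1 : Nat) : Int) := by push_cast; ring
      rw [hpush]
      exact ih (k + 1) (by omega) (by omega)

lemma remove_zeros_eq_filter (arr : List Int) :
    remove_zeros arr = arr.filter (fun x => x ≠ 0) := by
  unfold remove_zeros
  have h0 := removeZeros_loop arr 0 (by omega)
  simp only [List.take_zero, List.filter_nil, List.length_nil, List.drop_zero,
    List.nil_append, Int.natCast_zero] at h0
  rw [h0]
  simp

-- ---- B-side: repeated erasure of the first zero computes the filter ----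

-- Erasing the first 0 does not change the ≠0-filter.
lemma filter_erase_zero (xs : List Int) :
    (xs.erase 0).filter (fun x => x ≠ 0) = xs.filter (fun x => x ≠ 0) := by
  induction xs with
  | nil => rfl
  | cons x xs ih =>
      by_cases hx : x = 0
      · subst hx
        rw [List.erase_cons_head]
        simp
      · rw [List.erase_cons_tail (by simpa using hx), List.filter_cons, List.filter_cons, ih]

-- A fold over a list that ignores its elements is iteration of the step.
lemma foldl_const_iterate (f : List Int → List Int) :
    ∀ (l : List Int) (a : List Int),
      l.foldl (fun s _ => f s) a = f^[l.length] a := by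
  intro l
  induction l with
  | nil => intro a; rfl
  | cons x xs ih =>
      intro a
      simp [List.foldl_cons, ih, Function.iterate_succ_apply]

-- Iterating "remove the first 0" count-many times yields the filter.
lemma iterate_remove_eq_filter :
    ∀ (n : Nat) (xs : List Int), xs.count 0 = n →
      (fun st : List Int => match PySem.List.remove? st 0 with
                            | some l => l
                            | none => st)^[n] xs = xs.filter (fun x => x ≠ 0) := by
  intro n
  induction n with
  | zero =>
      intro xs hc
      have hnot : 0 ∉ xs := by
        intro hmem
        have := List.count_pos_iff.mpr hmem
        omega
      simp only [Function.iterate_zero, id_eq]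
      symm
      rw [List.filter_eq_self]
      intro a ha
      simp only [decide_eq_true_eq, ne_eq]
      intro h0; exact hnot (h0 ▸ ha)
  | succ n ih =>
      intro xs hc
      have hmem : (0 : Int) ∈ xs := by
        rw [← List.count_pos_iff]; omega
      rw [Function.iterate_succ_apply]
      have hrm : PySem.List.remove? xs (0 : Int) = some (xs.erase 0) :=
        PySem.List.remove?_eq_some_erase xs 0 hmem
      simp only [hrm]
      have hcount : (xs.erase 0).count 0 = n := by
        rw [List.count_erase_self]; omega
      rw [ih (xs.erase 0) hcount, filter_erase_zero]

lemma remove_zeros_alt_eq_filter (arr : List Int) :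
    remove_zeros_alt arr = arr.filter (fun x => x ≠ 0) := by
  unfold remove_zeros_alt
  rw [foldl_const_iterate]
  rw [PySem.List.length_pyRange_one]
  have hlen : ((((PySem.List.count arr 0 : Nat) : Int) - 0).toNat) = arr.count 0 := by
    simp [PySem.List.count]
  rw [hlen]
  exact iterate_remove_eq_filter (arr.count 0) arr rfl

-- ===== VERDICT (by name: the statement is the Claim_ definition above) =====
theorem remove_zeros_spec : Claim_equal_remove_zeros := by
  intro array _
  unfold Spec_remove_zeros
  rw [remove_zeros_eq_filter, remove_zeros_alt_eq_filter]
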